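-- pv_equiv track=rewrite | github.com/Facundo177/Guias_Python | parciales.py | torneo_de_gallinas
-- ===== SOURCE A (Python) =====
-- def pertenece(elemento, lista:list) -> bool:
--     for elem in lista:
--         if elem == elemento:
--             return True
--     return False
--
-- def torneo_de_gallinas( estrategias: dict[str, str]) -> dict[str,int]:
--     res:dict[str,int] = {}
--
--     for participante_1, estrategia_1 in estrategias.items():
--         for participante_2, estrategia_2 in estrategias.items():
--
--             if participante_1 == participante_2:
--                 continue
--             if not pertenece(participante_1, list(res.keys())):
--                 res[participante_1] = 0
--
--             if estrategia_1 == estrategia_2 == "me la banco y no me desvio":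
--                 res[participante_1] -= 5
--             elif estrategia_1 == estrategia_2 == "me desvio siempre":
--                 res[participante_1] -= 10
--             elif estrategia_1 == "me desvio siempre" and estrategia_2 == "me la banco y no me desvio":
--                 res[participante_1] -= 15
--             elif estrategia_1 == "me la banco y no me desvio" and estrategia_2 == "me desvio siempre":
--                 res[participante_1] += 10
--
--     return res
-- ===== SOURCE B (Python) =====
-- def torneo_de_gallinas(estrategias: dict[str, str]) -> dict[str, int]:
--     BANCO = "me la banco y no me desvio"
--     DESVIO = "me desvio siempre"
--     res: dict[str, int] = {}
--     if len(estrategias) < 2: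
--         return res
--     nb = sum(1 for e in estrategias.values() if e == BANCO)
--     nd = sum(1 for e in estrategias.values() if e == DESVIO)
--     for p, e in estrategias.items():
--         if e == BANCO:
--             res[p] = -5 * (nb - 1) + 10 * nd
--         elif e == DESVIO:
--             res[p] = -10 * (nd - 1) - 15 * nb
--         else:
--             res[p] = 0
--     return res
-- ===== Notes on version B (the rewrite author's own statement) =====
-- stated objective: faster
-- what changed: Replaces the quadratic all-pairs double loop (with a linear membership scan of res inside) by counting each strategy once and computing every participant's score from the two counts in O(1).
import Mathlib
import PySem

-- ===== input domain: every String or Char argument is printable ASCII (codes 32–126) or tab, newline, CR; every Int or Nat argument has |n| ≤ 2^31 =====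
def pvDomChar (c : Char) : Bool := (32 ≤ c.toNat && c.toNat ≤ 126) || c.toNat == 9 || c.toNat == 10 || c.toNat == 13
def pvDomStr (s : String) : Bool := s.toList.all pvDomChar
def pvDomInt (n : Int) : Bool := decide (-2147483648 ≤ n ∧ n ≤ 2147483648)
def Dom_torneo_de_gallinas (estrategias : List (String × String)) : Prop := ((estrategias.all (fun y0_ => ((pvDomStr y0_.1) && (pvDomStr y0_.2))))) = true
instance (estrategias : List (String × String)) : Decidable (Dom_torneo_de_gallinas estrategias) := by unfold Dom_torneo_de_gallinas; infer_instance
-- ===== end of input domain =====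

-- B replaces A's all-pairs double loop by counting the two strategies once and scoring each
-- participant from the counts; asymptotically faster, proved to return the same dict.


-- ===== PORT A =====
def pertenece (elemento : String) (lista : List String) : Bool :=
  match lista with
  | [] => false
  | elem :: rest => if elem == elemento then true else pertenece elemento rest

def torneo_de_gallinas (estrategias : List (String × String)) : List (String × Int) :=
  let items := (PySem.Dict.ofList estrategias).items
  (items.foldl (fun res p1 =>
    items.foldl (fun res p2 =>
      if p1.1 == p2.1 then res
      else
        let res := if !pertenece p1.1 res.keys then res.insert p1.1 0 else res
        if p1.2 == p2.2 && p2.2 == "me la banco y no me desvio" then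
          res.insert p1.1 (res.getD p1.1 0 - 5)
        else if p1.2 == p2.2 && p2.2 == "me desvio siempre" then
          res.insert p1.1 (res.getD p1.1 0 - 10)
        else if p1.2 == "me desvio siempre" && p2.2 == "me la banco y no me desvio" then
          res.insert p1.1 (res.getD p1.1 0 - 15)
        else if p1.2 == "me la banco y no me desvio" && p2.2 == "me desvio siempre" then
          res.insert p1.1 (res.getD p1.1 0 + 10)
        else res) res) (PySem.Dict.empty : PySem.Dict String Int)).items

-- ===== PORT B =====
def torneo_de_gallinas_alt (estrategias : List (String × String)) : List (String × Int) :=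
  let d := PySem.Dict.ofList estrategias
  if d.size < 2 then [] else
  let nb : Int := (d.values.filter (fun e => e == "me la banco y no me desvio")).length
  let nd : Int := (d.values.filter (fun e => e == "me desvio siempre")).length
  (d.items.foldl (fun res p =>
      res.insert p.1
        (if p.2 == "me la banco y no me desvio" then -5 * (nb - 1) + 10 * nd
         else if p.2 == "me desvio siempre" then -10 * (nd - 1) - 15 * nb
         else 0)) (PySem.Dict.empty : PySem.Dict String Int)).items

-- ===== PRECONDITION & SPEC =====
def Spec_torneo_de_gallinas (estrategias : List (String × String)) (out : List (String × Int)) : Prop := out = torneo_de_gallinas_alt estrategias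
instance (estrategias : List (String × String)) (out : List (String × Int)) : Decidable (Spec_torneo_de_gallinas estrategias out) := by unfold Spec_torneo_de_gallinas; infer_instance

-- ===== CLAIM (what is proved, stated in full; the proofs are below) =====
def Claim_equal_torneo_de_gallinas : Prop := ∀ (estrategias : List (String × String)), Dom_torneo_de_gallinas estrategias → Spec_torneo_de_gallinas estrategias (torneo_de_gallinas estrategias)

-- ===== LEMMAS AND PROOFS =====

def pvBanco : String := "me la banco y no me desvio"
def pvDesvio : String := "me desvio siempre"

-- payoff of one encounter, seen from the first participant
def pvDelta (e1 e2 : String) : Int :=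
  if e1 = pvBanco ∧ e2 = pvBanco then -5
  else if e1 = pvDesvio ∧ e2 = pvDesvio then -10
  else if e1 = pvDesvio ∧ e2 = pvBanco then -15
  else if e1 = pvBanco ∧ e2 = pvDesvio then 10
  else 0

-- A's inner-loop body, for a fixed first participant p1
def pvStep (p1 : String × String) (res : PySem.Dict String Int) (p2 : String × String) : PySem.Dict String Int :=
  if p1.1 == p2.1 then res
  else
    let res := if !pertenece p1.1 res.keys then res.insert p1.1 0 else res
    if p1.2 == p2.2 && p2.2 == "me la banco y no me desvio" then
      res.insert p1.1 (res.getD p1.1 0 - 5)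
    else if p1.2 == p2.2 && p2.2 == "me desvio siempre" then
      res.insert p1.1 (res.getD p1.1 0 - 10)
    else if p1.2 == "me desvio siempre" && p2.2 == "me la banco y no me desvio" then
      res.insert p1.1 (res.getD p1.1 0 - 15)
    else if p1.2 == "me la banco y no me desvio" && p2.2 == "me desvio siempre" then
      res.insert p1.1 (res.getD p1.1 0 + 10)
    else res

lemma pertenece_eq_contains (x : String) (l : List String) : pertenece x l = l.contains x := by
  induction l with
  | nil => rfl
  | cons a l ih =>
    simp [pertenece, ih]
    by_cases h : a = x <;> simp [h, eq_comm]
    intro hx; exact absurd hx.symm h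

lemma pv_insert_self_of_get? (d : PySem.Dict String Int) (k : String) (v : Int)
    (hnd : d.keys.Nodup) (h : d.get? k = some v) : d.insert k v = d := by
  apply PySem.Dict.ext
  rw [PySem.Dict.items_insert_of_contains]
  · conv_rhs => rw [← List.map_id d.items]
    apply List.map_congr_left
    intro p hp
    obtain ⟨k', v'⟩ := p
    by_cases hk : k' = k
    · have hg : d.get? k' = some v' := PySem.Dict.get?_of_mem_items d hp hnd
      rw [hk, h] at hg
      simp [hk, Option.some.injEq] at hg ⊢
      exact hg
    · simp [hk]
  · rw [PySem.Dict.contains_eq_isSome_get?, h]; rfl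

-- value of the first participant's encounter, as A's if-chain computes it
lemma pvStep_of_ne (p1 p2 : String × String) (res : PySem.Dict String Int)
    (hne : p1.1 ≠ p2.1) (hnd : res.keys.Nodup) :
    pvStep p1 res p2 = res.insert p1.1 (res.getD p1.1 0 + pvDelta p1.2 p2.2) := by
  have hne' : (p1.1 == p2.1) = false := by simp [hne]
  by_cases hc : res.contains p1.1
  · -- p1.1 is already a key of res
    have hpert : pertenece p1.1 res.keys = true := by
      rw [pertenece_eq_contains]
      simpa using (PySem.Dict.contains_iff_mem_keys res p1.1).mp hc
    rw [PySem.Dict.contains_eq_isSome_get?] at hc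
    obtain ⟨v, hv⟩ := Option.isSome_iff_exists.mp hc
    have hgd : res.getD p1.1 0 = v := PySem.Dict.getD_of_get?_eq_some res 0 hv
    have hself : res.insert p1.1 v = res := pv_insert_self_of_get? res p1.1 v hnd hv
    simp only [pvStep, hne', Bool.false_eq_true, if_false, hpert, Bool.not_true,
      Bool.false_eq_true, if_false]
    by_cases h1 : p1.2 = pvBanco <;> by_cases h2 : p2.2 = pvBanco <;>
      by_cases h3 : p1.2 = pvDesvio <;> by_cases h4 : p2.2 = pvDesvio <;>
      simp_all [pvDelta, pvBanco, pvDesvio, sub_eq_add_neg]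
  · -- p1.1 is inserted with 0 first
    have hc' : res.contains p1.1 = false := by simpa using hc
    have hpert : pertenece p1.1 res.keys = false := by
      rw [pertenece_eq_contains]
      by_contra hh
      exact absurd ((PySem.Dict.contains_iff_mem_keys res p1.1).mpr
        (by simpa using eq_true_of_ne_false hh)) (by simp [hc'])
    have hgd : res.getD p1.1 0 = 0 := PySem.Dict.getD_of_not_contains res 0 hc'
    simp only [pvStep, hne', Bool.false_eq_true, if_false, hpert, Bool.not_false, if_true,
      PySem.Dict.getD_insert_self, PySem.Dict.insert_insert_self]
    by_cases h1 : p1.2 = pvBanco <;> by_cases h2 : p2.2 = pvBanco <;>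
      by_cases h3 : p1.2 = pvDesvio <;> by_cases h4 : p2.2 = pvDesvio <;>
      simp_all [pvDelta, pvBanco, pvDesvio, sub_eq_add_neg]

lemma pv_inner_present (p1 : String × String) (l2 : List (String × String))
    (res : PySem.Dict String Int) (v : Int) (hnd : res.keys.Nodup) (h : res.get? p1.1 = some v) :
    l2.foldl (pvStep p1) res =
      res.insert p1.1 (v + ((l2.filter (fun q => decide (q.1 ≠ p1.1))).map (fun q => pvDelta p1.2 q.2)).sum) := by
  induction l2 generalizing res v with
  | nil =>
    simp only [List.foldl_nil, List.filter_nil, List.map_nil, List.sum_nil, add_zero]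
    exact (pv_insert_self_of_get? res p1.1 v hnd h).symm
  | cons q l2 ih =>
    by_cases hq : q.1 = p1.1
    · have hstep : pvStep p1 res q = res := by simp [pvStep, hq]
      rw [List.foldl_cons, hstep, ih res v hnd h]
      simp [hq]
    · have hgd : res.getD p1.1 0 = v := PySem.Dict.getD_of_get?_eq_some res 0 h
      rw [List.foldl_cons, pvStep_of_ne p1 q res (fun hh => hq hh.symm) hnd, hgd,
        ih _ (v + pvDelta p1.2 q.2) (PySem.Dict.nodup_keys_insert res p1.1 _ hnd)
          (PySem.Dict.get?_insert_self res p1.1 _),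
        PySem.Dict.insert_insert_self]
      have : ¬ (q.1 = p1.1) := hq
      simp [this, add_assoc]

lemma pv_inner_absent (p1 : String × String) (l2 : List (String × String))
    (res : PySem.Dict String Int) (hnd : res.keys.Nodup) (h : res.contains p1.1 = false) :
    l2.foldl (pvStep p1) res =
      if l2.all (fun q => q.1 == p1.1) then res
      else res.insert p1.1 (((l2.filter (fun q => decide (q.1 ≠ p1.1))).map (fun q => pvDelta p1.2 q.2)).sum) := by
  induction l2 generalizing res with
  | nil => simp
  | cons q l2 ih =>
    by_cases hq : q.1 = p1.1
    · have hstep : pvStep p1 res q = res := by simp [pvStep, hq]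
      rw [List.foldl_cons, hstep, ih res hnd h]
      have hb : (q.1 == p1.1) = true := by simp [hq]
      simp only [List.all_cons, List.filter_cons, hb, Bool.true_and]
      simp [hq]
    · have hgd : res.getD p1.1 0 = 0 := PySem.Dict.getD_of_not_contains res 0 h
      rw [List.foldl_cons, pvStep_of_ne p1 q res (fun hh => hq hh.symm) hnd, hgd,
        pv_inner_present p1 l2 _ (0 + pvDelta p1.2 q.2)
          (PySem.Dict.nodup_keys_insert res p1.1 _ hnd) (PySem.Dict.get?_insert_self res p1.1 _),
        PySem.Dict.insert_insert_self]
      have hq' : ¬ (q.1 = p1.1) := hq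
      simp [hq']

lemma pv_all_eq_false (L : List (String × String)) (p1 : String × String)
    (hnd : (L.map (·.1)).Nodup) (hlen : 2 ≤ L.length) (hp : p1 ∈ L) :
    (L.all fun q => q.1 == p1.1) = false := by
  match L, hlen with
  | a :: b :: t, _ =>
    simp only [List.map_cons, List.nodup_cons, List.mem_cons, List.mem_map] at hnd
    by_cases ha : a.1 = p1.1
    · have hb : ¬ (b.1 = p1.1) := fun hb => hnd.1 (Or.inl (ha ▸ hb.symm))
      simp only [List.all_eq_false]
      exact ⟨b, by simp, by simp [hb]⟩
    · simp only [List.all_eq_false]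
      exact ⟨a, by simp, by simp [ha]⟩

lemma pv_filter_sum (f : (String × String) → Int) (L : List (String × String)) (p1 : String × String)
    (hnd : (L.map (·.1)).Nodup) (hp : p1 ∈ L) :
    ((L.filter (fun q => decide (q.1 ≠ p1.1))).map f).sum = (L.map f).sum - f p1 := by
  induction L with
  | nil => cases hp
  | cons a L ih =>
    simp only [List.map_cons, List.nodup_cons, List.mem_map] at hnd
    rcases List.mem_cons.mp hp with rfl | hpL
    · have hfix : L.filter (fun q => !decide (q.1 = p1.1)) = L :=
        List.filter_eq_self.mpr (fun q hq => by
          have hne : ¬ (q.1 = p1.1) := fun h => hnd.1 ⟨q, hq, h⟩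
          simp [hne])
      simp [hfix]
    · have ha : a.1 ≠ p1.1 := fun h => hnd.1 ⟨p1, hpL, h.symm⟩
      have ih' := ih hnd.2 hpL
      simp only [ne_eq, decide_not] at ih'
      simp [ha, ih']
      ring

lemma pv_sum_delta (e1 : String) (vs : List String) :
    (vs.map (fun v => pvDelta e1 v)).sum =
      (if e1 = pvBanco then -5 else if e1 = pvDesvio then -15 else 0)
        * ((vs.filter (fun v => v == pvBanco)).length : Int)
      + (if e1 = pvBanco then 10 else if e1 = pvDesvio then -10 else 0)
        * ((vs.filter (fun v => v == pvDesvio)).length : Int) := by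
  have hBD : pvBanco ≠ pvDesvio := by decide
  induction vs with
  | nil => simp
  | cons v vs ih =>
    have hv : pvDelta e1 v =
        (if e1 = pvBanco then -5 else if e1 = pvDesvio then -15 else 0)
          * (if v = pvBanco then 1 else 0)
        + (if e1 = pvBanco then 10 else if e1 = pvDesvio then -10 else 0)
          * (if v = pvDesvio then 1 else 0) := by
      by_cases h1 : e1 = pvBanco <;> by_cases h2 : v = pvBanco <;>
        by_cases h3 : e1 = pvDesvio <;> by_cases h4 : v = pvDesvio <;>
        simp_all [pvDelta]
    simp only [List.map_cons, List.sum_cons, ih, hv, List.filter_cons]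
    by_cases h2 : v = pvBanco <;> by_cases h4 : v = pvDesvio <;>
      by_cases h1 : e1 = pvBanco <;> by_cases h3 : e1 = pvDesvio <;>
      simp_all <;> ring

lemma pv_outer (L : List (String × String)) (hlen : 2 ≤ L.length)
    (hndL : (L.map (·.1)).Nodup) (l1 : List (String × String)) :
    ∀ (res : PySem.Dict String Int), (∀ p ∈ l1, p ∈ L) → (l1.map (·.1)).Nodup →
    res.keys.Nodup → (∀ p ∈ l1, res.contains p.1 = false) →
    (l1.foldl (fun res p1 => L.foldl (pvStep p1) res) res).items
      = res.items ++ l1.map (fun p1 =>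
          (p1.1, ((L.filter (fun q => decide (q.1 ≠ p1.1))).map (fun q => pvDelta p1.2 q.2)).sum)) := by
  induction l1 with
  | nil => intro res _ _ _ _; simp
  | cons p1 l1 ih =>
    intro res hsub hnd1 hndres hfree
    have hmem : p1 ∈ L := hsub p1 (by simp)
    have hc : res.contains p1.1 = false := hfree p1 (by simp)
    rw [List.foldl_cons, pv_inner_absent p1 L res hndres hc,
      pv_all_eq_false L p1 hndL hlen hmem]
    simp only [Bool.false_eq_true, if_false]
    simp only [List.map_cons, List.nodup_cons, List.mem_map] at hnd1
    rw [ih _ (fun p hp => hsub p (List.mem_cons_of_mem _ hp)) hnd1.2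
      (PySem.Dict.nodup_keys_insert res p1.1 _ hndres)
      (fun p hp => by
        rw [PySem.Dict.contains_insert]
        have : ¬ (p.1 = p1.1) := fun h => hnd1.1 ⟨p, hp, h⟩
        simp [this, hfree p (List.mem_cons_of_mem _ hp)]),
      PySem.Dict.items_insert_of_not_contains res _ hc]
    simp

lemma pv_torneo_eq (estr : List (String × String)) :
    torneo_de_gallinas estr =
      ((PySem.Dict.ofList estr).items.foldl
        (fun res p1 => (PySem.Dict.ofList estr).items.foldl (pvStep p1) res)
        (PySem.Dict.empty : PySem.Dict String Int)).items := rfl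

lemma pv_alt_eq (estr : List (String × String)) :
    torneo_de_gallinas_alt estr =
      if (PySem.Dict.ofList estr).size < 2 then [] else
      ((PySem.Dict.ofList estr).items.foldl (fun res p =>
        res.insert p.1
          (if p.2 == pvBanco then
              -5 * ((((PySem.Dict.ofList estr).values.filter (fun e => e == pvBanco)).length : Int) - 1)
                + 10 * (((PySem.Dict.ofList estr).values.filter (fun e => e == pvDesvio)).length : Int)
           else if p.2 == pvDesvio then
              -10 * ((((PySem.Dict.ofList estr).values.filter (fun e => e == pvDesvio)).length : Int) - 1)
                - 15 * (((PySem.Dict.ofList estr).values.filter (fun e => e == pvBanco)).length : Int)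
           else 0)) (PySem.Dict.empty : PySem.Dict String Int)).items := rfl

-- ===== VERDICT (by name: the statement is the Claim_ definition above) =====
theorem torneo_de_gallinas_spec : Claim_equal_torneo_de_gallinas := by
  unfold Claim_equal_torneo_de_gallinas
  intro estr _
  show torneo_de_gallinas estr = torneo_de_gallinas_alt estr
  rw [pv_torneo_eq, pv_alt_eq]
  have hBD : pvBanco ≠ pvDesvio := by decide
  set L := (PySem.Dict.ofList estr).items with hLdef
  have hvals : (PySem.Dict.ofList estr).values = L.map (·.2) := rfl
  have hsize : (PySem.Dict.ofList estr).size = L.length := rfl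
  have hndL : (L.map (·.1)).Nodup := PySem.Dict.nodup_keys_ofList estr
  rw [hvals, hsize]
  clear_value L
  by_cases hlen : 2 ≤ L.length
  · -- at least two participants
    rw [if_neg (by omega)]
    rw [pv_outer L hlen hndL L PySem.Dict.empty (fun p hp => hp) hndL (by simp) (fun p _ => by simp)]
    rw [PySem.Dict.items_foldl_insert_fresh L (·.1) _ PySem.Dict.empty (fun p _ => by simp) hndL]
    have hemp : (PySem.Dict.empty : PySem.Dict String Int).items = [] := rfl
    rw [hemp, List.nil_append, List.nil_append]
    apply List.map_congr_left
    intro p1 hp1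
    refine congrArg (Prod.mk p1.1) ?_
    rw [pv_filter_sum (fun q => pvDelta p1.2 q.2) L p1 hndL hp1]
    have hmm : (L.map (fun q => pvDelta p1.2 q.2)).sum
        = ((L.map (·.2)).map (fun v => pvDelta p1.2 v)).sum := by
      rw [List.map_map]; rfl
    rw [hmm, pv_sum_delta p1.2 (L.map (·.2))]
    have hBD' : pvDesvio ≠ pvBanco := fun h => hBD h.symm
    by_cases h1 : p1.2 = pvBanco
    · simp only [pvDelta, h1, beq_iff_eq, if_pos, and_self]
      simp
      ring
    · by_cases h3 : p1.2 = pvDesvio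
      · simp only [pvDelta, h3, beq_iff_eq]
        simp [hBD']
        ring
      · simp [pvDelta, h1, h3]
  · -- fewer than two participants: both sides are the empty dict
    rw [if_pos (by omega)]
    rcases L with _ | ⟨p, _ | ⟨q, t⟩⟩
    · rfl
    · simp only [List.foldl_cons, List.foldl_nil]
      have hstep : pvStep p PySem.Dict.empty p = PySem.Dict.empty := by
        simp [pvStep]
      rw [hstep]
      rfl
    · exact absurd (by simp) hlen
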